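-- pv_equiv track=rewrite | github.com/sanazshaik/Playfair | playfair.py | playfairRuleTwo
-- ===== SOURCE A (Python) =====
-- def playfairRuleTwo(pair, table):
--     '''
--     If the letters in the pair appear in the same row of the table,
--     replace them with the letters to their immediate right respectively
--     (wrapping around to the left of a row if a letter in the original
--     pair was on the right side of the row).  Return the new pair.
--
--     You can assume that the pair input received by this function will
--     be two characters long and already converted to lowercase, and
--     that the Playfair Table is valid.
--
--     Input:   string:         potentially modified bigram
--     Input:   list of lists:  ciphertable
--     Output:  string:         potentially modified bigram
--     '''
--     for i in range(5): # row
--         i1, i2 = i, i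
--         j1, j2 = -1, -1
--         for j in range(5): # column
--             if table[i][j] == pair[0]: # first letter
--                 i1 = i
--                 j1 = j
--             elif table[i][j] == pair[1]: # i and j are the coordinates and checks that of the first pair
--                 i2 = i
--                 j2 = j
--         if j1 != -1 and j2 != -1: # loops backs in the row if the second character is located at the last position ( j2 == 4 ) and takes the first character of that same row
--             if j2 == 4:
--                 x = table[i1][j1+1]
--                 y = table[i2][0]
--             else:
--                 x = table[i1][j1+1]
--                 y = table[i2][j2+1]
--             pair = pair[:0] + x + pair[1:] # moves the first given character to the second character
--             pair = pair[:1] + y + pair[2:] # moves the second given character to the third character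
--             return pair
--     return pair
-- ===== SOURCE B (Python) =====
-- def playfairRuleTwo(pair, table):
--     flat = [table[r][c] for r in range(5) for c in range(5)]
--     a, b = pair[0], pair[1]
--     if a == b or a not in flat or b not in flat:
--         return pair
--     r1, c1 = divmod(flat.index(a), 5)
--     r2, c2 = divmod(flat.index(b), 5)
--     if r1 != r2:
--         return pair
--     return flat[5 * r1 + (c1 + 1) % 5] + flat[5 * r2 + (c2 + 1) % 5] + pair[2:]
-- ===== Notes on version B (the rewrite author's own statement) =====
-- stated objective: idiomatic
-- what changed: A scans each of the 5 rows with a nested column loop maintaining four loop-state coordinates and rebuilds the pair by two string splices; B builds the 25-cell flat list once, locates both letters with list.index, decodes row/column by divmod, and returns the two right-neighbours by modular arithmetic indexing. Pre_ admits bigrams of >=2 chars with a full 5x5 scan region that is either degenerate (doubled or absent letter: both return the pair) or a valid Playfair table (exactly 5x5, each pair letter at most once, single-character right-neighbour, no column-4 wrap crash); …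
-- outside the precondition, e.g. on playfairRuleTwo('ab', [['a', 'b', 'c', 'd', 'e']]): A returns 'bc', B raises IndexError
import Mathlib
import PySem

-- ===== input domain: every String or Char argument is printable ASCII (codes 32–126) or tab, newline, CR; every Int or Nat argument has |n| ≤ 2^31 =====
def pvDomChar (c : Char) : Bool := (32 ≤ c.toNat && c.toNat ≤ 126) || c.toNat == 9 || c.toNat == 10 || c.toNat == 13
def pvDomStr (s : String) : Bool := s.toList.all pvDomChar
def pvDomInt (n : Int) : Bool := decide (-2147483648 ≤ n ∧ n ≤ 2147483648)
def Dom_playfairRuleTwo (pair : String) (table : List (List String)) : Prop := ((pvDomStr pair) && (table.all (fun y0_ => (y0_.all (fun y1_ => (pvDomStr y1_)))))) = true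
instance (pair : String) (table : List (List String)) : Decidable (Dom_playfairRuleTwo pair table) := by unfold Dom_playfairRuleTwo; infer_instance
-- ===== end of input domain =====

-- B replaces A's per-row column scans and its two string splices by one flatten of the table,
-- list.index lookups decoded with divmod, and direct arithmetic indexing (idiomatic, same cost).

-- ===== PORT A =====
def pvChar (pair : String) (i : Int) : String :=
  match PySem.Str.pyGet? pair i with
  | some c => String.ofList [c]
  | none => ""

def pvA_inner (pair : String) (table : List (List String)) (i : Int) : Int × Int × Int × Int :=
  (PySem.List.pyRange 0 5 1).foldl (fun s j =>
    let cell := PySem.List.pyGetD (PySem.List.pyGetD table i []) j ""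
    if cell = pvChar pair 0 then (i, j, s.2.2)
    else if cell = pvChar pair 1 then (s.1, s.2.1, i, j)
    else s) (i, -1, i, -1)

def pvA_outer (pair : String) (table : List (List String)) : List Int → String
  | [] => pair
  | i :: rest =>
    let s := pvA_inner pair table i
    if s.2.1 ≠ -1 ∧ s.2.2.2 ≠ -1 then
      let x := PySem.List.pyGetD (PySem.List.pyGetD table s.1 []) (s.2.1 + 1) ""
      let y := if s.2.2.2 = 4 then PySem.List.pyGetD (PySem.List.pyGetD table s.2.2.1 []) 0 ""
               else PySem.List.pyGetD (PySem.List.pyGetD table s.2.2.1 []) (s.2.2.2 + 1) ""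
      let pl := pair.toList
      let p1s := PySem.List.slice pl none (some 0) ++ x.toList ++ PySem.List.slice pl (some 1) none
      let p2s := PySem.List.slice p1s none (some 1) ++ y.toList ++ PySem.List.slice p1s (some 2) none
      String.ofList p2s
    else pvA_outer pair table rest

def playfairRuleTwo (pair : String) (table : List (List String)) : String :=
  pvA_outer pair table (PySem.List.pyRange 0 5 1)

-- ===== PORT B =====
def playfairRuleTwo_alt (pair : String) (table : List (List String)) : String :=
  let flat := (PySem.List.pyRange 0 5 1).flatMap (fun r_ =>
    (PySem.List.pyRange 0 5 1).map (fun c => PySem.List.pyGetD (PySem.List.pyGetD table r_ []) c ""))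
  let a := pvChar pair 0
  let b := pvChar pair 1
  if a = b ∨ a ∉ flat ∨ b ∉ flat then pair
  else
    let ia : Int := ((PySem.List.index? flat a).getD 0 : Nat)
    let ib : Int := ((PySem.List.index? flat b).getD 0 : Nat)
    let q1 := (PySem.Int.divmod? ia 5).getD (0, 0)
    let q2 := (PySem.Int.divmod? ib 5).getD (0, 0)
    if q1.1 ≠ q2.1 then pair
    else
      let x := PySem.List.pyGetD flat (5 * q1.1 + PySem.Int.mod (q1.2 + 1) 5) ""
      let y := PySem.List.pyGetD flat (5 * q2.1 + PySem.Int.mod (q2.2 + 1) 5) ""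
      String.ofList (x.toList ++ y.toList ++ PySem.List.slice pair.toList (some 2) none)

-- ===== PRECONDITION & SPEC =====
-- first / second letter of the bigram, as 1-character strings (independent of the ports)
def pvP0 (pair : String) : String := String.ofList (pair.toList.take 1)
def pvP1 (pair : String) : String := String.ofList ((pair.toList.drop 1).take 1)

-- Pre_ admits the inputs on which A completes its scan and the two programs are provably equal:
-- a bigram of ≥ 2 characters and a table whose scanned 5×5 region exists, which is EITHER
-- degenerate (a doubled letter, or a pair letter absent from the table — both programs return the
-- pair unchanged) OR a valid Playfair table (exactly 5×5, each pair letter at most once, the cell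
-- right of the first letter a single character, no column-4 wrap crash).  It excludes (a) inputs
-- where A raises IndexError (short pairs, malformed tables, and the first letter in column 4 of a
-- matching row, where A's missing wrap crashes while B wraps), and (b) defensible-corner accidents
-- of A's implementation that B does not reproduce: the first-matching-row / last-occurrence choice
-- among duplicated pair letters, matches in tables that are not 5×5, and A's character-splicing of
-- multi-character neighbour cells.
def Pre_playfairRuleTwo (pair : String) (table : List (List String)) : Prop :=
  2 ≤ pair.toList.length ∧
  5 ≤ table.length ∧
  (∀ j : Nat, j < 5 → 5 ≤ (table.getD j []).length) ∧
  ((pvP0 pair = pvP1 pair ∨ pvP0 pair ∉ table.flatMap (fun row => row)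
      ∨ pvP1 pair ∉ table.flatMap (fun row => row)) ∨
   (table.length = 5 ∧
    (∀ row ∈ table, row.length = 5) ∧
    (table.flatMap (fun row => row)).count (pvP0 pair) ≤ 1 ∧
    (table.flatMap (fun row => row)).count (pvP1 pair) ≤ 1 ∧
    (∀ row ∈ table, row.getD 4 "" = pvP0 pair → pvP0 pair = pvP1 pair ∨ pvP1 pair ∉ row) ∧
    (∀ row ∈ table, ∀ c : Nat, c < 4 → row.getD c "" = pvP0 pair → pvP1 pair ∈ row →
        pvP0 pair ≠ pvP1 pair → (row.getD (c+1) "").toList.length = 1)))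
instance (pair : String) (table : List (List String)) : Decidable (Pre_playfairRuleTwo pair table) := by
  unfold Pre_playfairRuleTwo; infer_instance

def pvWitness_playfairRuleTwo : String × List (List String) :=
  ("ab", [["a","b","c","d","e"],["f","g","h","i","j"],["k","l","m","n","o"],
          ["p","q","r","s","t"],["u","v","w","x","y"]])

def Spec_playfairRuleTwo (pair : String) (table : List (List String)) (out : String) : Prop :=
  out = playfairRuleTwo_alt pair table
instance (pair : String) (table : List (List String)) (out : String) : Decidable (Spec_playfairRuleTwo pair table out) := by
  unfold Spec_playfairRuleTwo; infer_instance

-- ===== CLAIM (what is proved, stated in full; the proofs are below) =====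
def Claim_equal_playfairRuleTwo : Prop := ∀ (pair : String) (table : List (List String)), Dom_playfairRuleTwo pair table → Pre_playfairRuleTwo pair table → Spec_playfairRuleTwo pair table (playfairRuleTwo pair table)

-- ===== LEMMAS AND PROOFS =====

def pvF (p0 p1 : String) (i : Int) (s : Int × Int × Int × Int) (p : Int × String) : Int × Int × Int × Int :=
  if p.2 = p0 then (i, p.1, s.2.2) else if p.2 = p1 then (s.1, s.2.1, i, p.1) else s

lemma pv_count_one_decomp (l : List String) (x : String) (hx : x ∈ l) (hc : l.count x ≤ 1) :
    ∃ u v, l = u ++ x :: v ∧ x ∉ u ∧ x ∉ v := by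
  induction l with
  | nil => cases hx
  | cons a t ih =>
    by_cases hax : a = x
    · subst hax
      refine ⟨[], t, rfl, by simp, ?_⟩
      have : t.count a = 0 := by
        have h2 : (a :: t).count a = t.count a + 1 := List.count_cons_self
        omega
      simpa [List.count_eq_zero] using this
    · have hxt : x ∈ t := by
        rcases List.mem_cons.1 hx with h | h
        · exact absurd h.symm hax
        · exact h
      have hct : t.count x ≤ 1 := by
        rwa [List.count_cons_of_ne (by simpa using fun h => hax h)] at hc
      obtain ⟨u, v, rfl, hu, hv⟩ := ih hxt hct
      exact ⟨a :: u, v, rfl, by simp [hu, Ne.symm hax], hv⟩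

lemma pv_fst (p0 p1 : String) (i : Int) (e : List (Int × String)) (s : Int × Int × Int × Int)
    (h : s.1 = i) : (e.foldl (pvF p0 p1 i) s).1 = i := by
  induction e generalizing s with
  | nil => simpa using h
  | cons p t ih =>
    simp only [List.foldl_cons]
    apply ih
    simp only [pvF]
    split_ifs <;> simp [h]

lemma pv_i2 (p0 p1 : String) (i : Int) (e : List (Int × String)) (s : Int × Int × Int × Int)
    (h : s.2.2.1 = i) : (e.foldl (pvF p0 p1 i) s).2.2.1 = i := by
  induction e generalizing s with
  | nil => simpa using h
  | cons p t ih =>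
    simp only [List.foldl_cons]
    apply ih
    simp only [pvF]
    split_ifs <;> simp [h]

lemma pv_j1_skip (p0 p1 : String) (i : Int) (e : List (Int × String)) (s : Int × Int × Int × Int)
    (h : ∀ p ∈ e, p.2 ≠ p0) : (e.foldl (pvF p0 p1 i) s).2.1 = s.2.1 := by
  induction e generalizing s with
  | nil => rfl
  | cons p t ih =>
    simp only [List.foldl_cons]
    rw [ih _ (fun q hq => h q (List.mem_cons_of_mem _ hq))]
    simp only [pvF]
    rw [if_neg (h p (List.mem_cons_self))]
    split_ifs <;> rfl

lemma pv_j2_skip (p0 p1 : String) (i : Int) (e : List (Int × String)) (s : Int × Int × Int × Int)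
    (h : ∀ p ∈ e, p.2 = p0 ∨ p.2 ≠ p1) : (e.foldl (pvF p0 p1 i) s).2.2.2 = s.2.2.2 := by
  induction e generalizing s with
  | nil => rfl
  | cons p t ih =>
    simp only [List.foldl_cons]
    rw [ih _ (fun q hq => h q (List.mem_cons_of_mem _ hq))]
    simp only [pvF]
    rcases h p (List.mem_cons_self) with h1 | h1
    · rw [if_pos h1]
    · split_ifs <;> simp_all

lemma pv_mem_enum_snd {l : List String} {s : Int} {p : Int × String}
    (h : p ∈ PySem.List.enumerate l s) : p.2 ∈ l := by
  have := PySem.List.mem_enumerate_iff (xs := l) (s := s) (p := p)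
  obtain ⟨k, hk, rfl⟩ := this.1 h
  simp

lemma pv_j1_hit (p0 p1 : String) (i : Int) (u v : List String) (s : Int × Int × Int × Int)
    (hv : p0 ∉ v) :
    ((PySem.List.enumerate (u ++ p0 :: v) 0).foldl (pvF p0 p1 i) s).2.1 = (u.length : Int) := by
  rw [PySem.List.enumerate_append, PySem.List.enumerate_cons, List.foldl_append]
  simp only [List.foldl_cons]
  rw [pv_j1_skip]
  · show ((pvF p0 p1 i) _ (0 + (u.length:Int), p0)).2.1 = _
    simp [pvF]
  · intro p hp
    have := pv_mem_enum_snd hp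
    exact fun h => hv (h ▸ this)

lemma pv_j2_hit (p0 p1 : String) (i : Int) (w z : List String) (s : Int × Int × Int × Int)
    (hz : p1 ∉ z) (hne : p1 ≠ p0) :
    ((PySem.List.enumerate (w ++ p1 :: z) 0).foldl (pvF p0 p1 i) s).2.2.2 = (w.length : Int) := by
  rw [PySem.List.enumerate_append, PySem.List.enumerate_cons, List.foldl_append]
  simp only [List.foldl_cons]
  rw [pv_j2_skip]
  · show ((pvF p0 p1 i) _ (0 + (w.length:Int), p1)).2.2.2 = _
    simp [pvF, hne]
  · intro p hp
    have := pv_mem_enum_snd hp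
    exact Or.inr (fun h => hz (h ▸ this))

lemma pv_inner_enum (pair : String) (table : List (List String)) (i : Int) (row : List String)
    (hrow : PySem.List.pyGetD table i [] = row) (h5 : 5 ≤ row.length) :
    pvA_inner pair table i
      = (PySem.List.enumerate (row.take 5) 0).foldl (pvF (pvChar pair 0) (pvChar pair 1) i) (i, -1, i, -1) := by
  unfold pvA_inner
  rw [show (5:Int) = PySem.List.len (row.take 5) by
    simp [PySem.List.len_eq, List.length_take]; omega]
  rw [PySem.List.enumerate_eq_map_pyRange (row.take 5) ""]
  rw [List.foldl_map]
  simp only [hrow]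
  apply PySem.List.foldl_congr_mem
  intro acc j hj
  have hj' := (PySem.List.mem_pyRange_one (x := j) (a := 0) (b := PySem.List.len (row.take 5))).1 hj
  have hjlen : j < 5 := by
    have := hj'.2
    rw [PySem.List.len_eq] at this
    simp [List.length_take] at this
    omega
  have hcell : PySem.List.pyGetD row j "" = PySem.List.pyGetD (row.take 5) j "" := by
    have h0j := hj'.1
    conv_lhs => rw [show j = ((j.toNat : Nat) : Int) by omega]
    conv_rhs => rw [show j = ((j.toNat : Nat) : Int) by omega]
    rw [PySem.List.pyGetD_natCast, PySem.List.pyGetD_natCast,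
      List.getD_eq_getElem _ _ (by omega : j.toNat < row.length),
      List.getD_eq_getElem _ _ (by simp [List.length_take]; omega)]
    simp [List.getElem_take]
  simp only [hcell]
  rfl

lemma pv_outer_skip (pair : String) (table : List (List String)) (L : List Int)
    (h : ∀ i ∈ L, ¬((pvA_inner pair table i).2.1 ≠ -1 ∧ (pvA_inner pair table i).2.2.2 ≠ -1)) :
    pvA_outer pair table L = pair := by
  induction L with
  | nil => rfl
  | cons i t ih =>
    show pvA_outer pair table (i :: t) = pair
    unfold pvA_outer
    rw [if_neg (h i (List.mem_cons_self))]
    exact ih (fun j hj => h j (List.mem_cons_of_mem _ hj))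

lemma pv_outer_append_skip (pair : String) (table : List (List String)) (L1 L2 : List Int)
    (h : ∀ i ∈ L1, ¬((pvA_inner pair table i).2.1 ≠ -1 ∧ (pvA_inner pair table i).2.2.2 ≠ -1)) :
    pvA_outer pair table (L1 ++ L2) = pvA_outer pair table L2 := by
  induction L1 with
  | nil => rfl
  | cons i t ih =>
    show pvA_outer pair table (i :: (t ++ L2)) = _
    conv_lhs => rw [pvA_outer]
    rw [if_neg (h i (List.mem_cons_self))]
    exact ih (fun j hj => h j (List.mem_cons_of_mem _ hj))

lemma pv_divmod (k c : Nat) (hc : c < 5) :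
    (PySem.Int.divmod? ((5*k+c : Nat) : Int) 5).getD (0,0) = ((k:Int), (c:Int)) := by
  simp only [PySem.Int.divmod?, if_neg (by norm_num : ¬(5:Int) = 0), Option.getD_some]
  refine Prod.ext ?_ ?_
  · rw [Int.fdiv_eq_ediv_of_nonneg _ (by norm_num)]
    push_cast; omega
  · rw [Int.fmod_eq_emod_of_nonneg _ (by norm_num)]
    push_cast; omega

lemma pv_count_row_le (l : List (List String)) (row : List String) (h : row ∈ l) (x : String) :
    row.count x ≤ (l.flatten).count x := by
  obtain ⟨s, t, rfl⟩ := List.append_of_mem h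
  simp [List.count_append]
  omega

lemma pv_flatten_take_len (table : List (List String))
    (hr5 : ∀ row ∈ table, row.length = 5) (k : Nat) :
    ((table.take k).flatten).length = 5 * (min k table.length) := by
  rw [List.length_flatten]
  rw [List.sum_eq_card_nsmul _ 5 (by
    intro x hx
    obtain ⟨row, hrow, rfl⟩ := List.mem_map.1 hx
    exact hr5 row (List.mem_of_mem_take hrow))]
  simp [Nat.mul_comm]

lemma pv_split_flatten (table : List (List String)) (k : Nat) (hk : k < table.length) :
    table.flatten = (table.take k).flatten ++ table.getD k [] ++ (table.drop (k+1)).flatten := by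
  conv_lhs => rw [← List.take_append_drop k table]
  rw [List.drop_eq_getElem_cons hk, List.getD_eq_getElem _ _ hk]
  rw [List.flatten_append, List.flatten_cons, List.append_assoc]

lemma pv_row_unique (table : List (List String)) (x : String)
    (hc : (table.flatten).count x ≤ 1) (k m : Nat) (hk : k < table.length) (hm : m < table.length)
    (hne : m ≠ k) (hxk : x ∈ table.getD k []) : x ∉ table.getD m [] := by
  intro hxm
  have h1 : 1 ≤ (table.getD k []).count x := List.one_le_count_iff.2 hxk
  have h2 : 1 ≤ (table.getD m []).count x := List.one_le_count_iff.2 hxm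
  rw [pv_split_flatten table k hk, List.count_append, List.count_append] at hc
  have hmem : table.getD m [] ∈ table.take k ∨ table.getD m [] ∈ table.drop (k+1) := by
    rcases Nat.lt_or_ge m k with h | h
    · left
      rw [List.getD_eq_getElem _ _ hm]
      exact List.mem_take_iff_getElem.2 ⟨m, by omega, rfl⟩
    · right
      have hmk : k + 1 ≤ m := by omega
      rw [List.getD_eq_getElem _ _ hm]
      rw [List.mem_iff_getElem]
      exact ⟨m - (k+1), by simp; omega, by rw [List.getElem_drop]; congr 1; omega⟩
  rcases hmem with h | h
  · have := pv_count_row_le _ _ h x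
    omega
  · have := pv_count_row_le _ _ h x
    omega

lemma pv_flat_getD (table : List (List String)) (hr5 : ∀ row ∈ table, row.length = 5)
    (k : Nat) (hk : k < table.length) (c : Nat) (hc : c < 5) :
    (table.flatten).getD (5*k+c) "" = (table.getD k []).getD c "" := by
  rw [pv_split_flatten table k hk, List.append_assoc]
  rw [List.getD_append_right _ _ _ _ (by rw [pv_flatten_take_len table hr5 k]; omega)]
  rw [pv_flatten_take_len table hr5 k]
  have hmin : min k table.length = k := by omega
  rw [hmin]
  rw [List.getD_append _ _ _ _ (by
    have : (table.getD k []).length = 5 := hr5 _ (by rw [List.getD_eq_getElem _ _ hk]; exact List.getElem_mem hk)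
    omega)]
  congr 1
  omega

lemma pv_row_skip (pair : String) (table : List (List String)) (i : Int) (row : List String)
    (hrow : PySem.List.pyGetD table i [] = row) (h5 : 5 ≤ row.length)
    (h : (∀ cell ∈ row, cell ≠ pvChar pair 0) ∨
         (∀ cell ∈ row, cell = pvChar pair 0 ∨ cell ≠ pvChar pair 1)) :
    ¬((pvA_inner pair table i).2.1 ≠ -1 ∧ (pvA_inner pair table i).2.2.2 ≠ -1) := by
  rw [pv_inner_enum pair table i row hrow h5]
  rcases h with h | h
  · intro hcon
    exact hcon.1 (pv_j1_skip _ _ _ _ _ (fun p hp =>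
      h _ (List.mem_of_mem_take (pv_mem_enum_snd hp))))
  · intro hcon
    exact hcon.2 (pv_j2_skip _ _ _ _ _ (fun p hp =>
      h _ (List.mem_of_mem_take (pv_mem_enum_snd hp))))

lemma pvB_guard (pair : String) (table : List (List String))
    (h : pvChar pair 0 = pvChar pair 1
        ∨ pvChar pair 0 ∉ (PySem.List.pyRange 0 5 1).flatMap (fun r_ =>
            (PySem.List.pyRange 0 5 1).map (fun c => PySem.List.pyGetD (PySem.List.pyGetD table r_ []) c ""))
        ∨ pvChar pair 1 ∉ (PySem.List.pyRange 0 5 1).flatMap (fun r_ =>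
            (PySem.List.pyRange 0 5 1).map (fun c => PySem.List.pyGetD (PySem.List.pyGetD table r_ []) c ""))) :
    playfairRuleTwo_alt pair table = pair := by
  unfold playfairRuleTwo_alt
  rw [if_pos h]

-- every cell of B's scanned 5×5 region lies in the flattened table
lemma pv_comp_subset (table : List (List String)) (htg : 5 ≤ table.length)
    (hrg : ∀ j : Nat, j < 5 → 5 ≤ (table.getD j []).length) :
    ∀ x ∈ (PySem.List.pyRange 0 5 1).flatMap (fun r_ =>
        (PySem.List.pyRange 0 5 1).map (fun c => PySem.List.pyGetD (PySem.List.pyGetD table r_ []) c "")),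
      x ∈ table.flatten := by
  intro x hx
  simp only [List.mem_flatMap, List.mem_map] at hx
  obtain ⟨r_, hr_, c, hc, rfl⟩ := hx
  have hr' := (PySem.List.mem_pyRange_one (x := r_) (a := 0) (b := 5)).1 hr_
  have hc' := (PySem.List.mem_pyRange_one (x := c) (a := 0) (b := 5)).1 hc
  have e1 : PySem.List.pyGetD table r_ [] = table.getD r_.toNat [] := by
    conv_lhs => rw [show r_ = ((r_.toNat : Nat) : Int) by omega]
    rw [PySem.List.pyGetD_natCast]
  have e2 : PySem.List.pyGetD (table.getD r_.toNat []) c "" = (table.getD r_.toNat []).getD c.toNat "" := by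
    conv_lhs => rw [show c = ((c.toNat : Nat) : Int) by omega]
    rw [PySem.List.pyGetD_natCast]
  rw [e1, e2]
  refine List.mem_flatten.2 ⟨table.getD r_.toNat [], ?_, ?_⟩
  · rw [List.getD_eq_getElem _ _ (by omega)]
    exact List.getElem_mem (by omega)
  · have h5 := hrg r_.toNat (by omega)
    have hb : c.toNat < (table.getD r_.toNat []).length := by omega
    rw [List.getD_eq_getElem _ _ hb]
    exact List.getElem_mem hb

lemma pv_len5 {α : Type} (l : List α) (h : l.length = 5) :
    ∃ a b c d e, l = [a, b, c, d, e] := by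
  rcases l with _ | ⟨a, _ | ⟨b, _ | ⟨c, _ | ⟨d, _ | ⟨e, _ | ⟨f, t⟩⟩⟩⟩⟩⟩
  · simp at h
  · simp at h
  · simp at h
  · simp at h
  · simp at h
  · exact ⟨a, b, c, d, e, rfl⟩
  · simp at h

-- on an exactly-5×5 table, B's scanned region IS the flattened table
lemma pv_comp_eq_flatten (table : List (List String)) (ht5 : table.length = 5)
    (hr5 : ∀ row ∈ table, row.length = 5) :
    (PySem.List.pyRange 0 5 1).flatMap (fun r_ =>
        (PySem.List.pyRange 0 5 1).map (fun c => PySem.List.pyGetD (PySem.List.pyGetD table r_ []) c ""))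
      = table.flatten := by
  obtain ⟨r0, r1, r2, r3, r4, rfl⟩ := pv_len5 table ht5
  have hrow : ∀ row : List String, row.length = 5 →
      ([(0:Int), 1, 2, 3, 4]).map (fun c => PySem.List.pyGetD row c "") = row := by
    intro row h
    obtain ⟨a, b, c, d, e, rfl⟩ := pv_len5 row h
    rfl
  rw [show PySem.List.pyRange 0 5 1 = [0, 1, 2, 3, 4] from by decide]
  simp only [List.flatMap_cons, List.flatMap_nil, List.append_nil]
  rw [show PySem.List.pyGetD [r0, r1, r2, r3, r4] (0:Int) [] = r0 from rfl,
      show PySem.List.pyGetD [r0, r1, r2, r3, r4] (1:Int) [] = r1 from rfl,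
      show PySem.List.pyGetD [r0, r1, r2, r3, r4] (2:Int) [] = r2 from rfl,
      show PySem.List.pyGetD [r0, r1, r2, r3, r4] (3:Int) [] = r3 from rfl,
      show PySem.List.pyGetD [r0, r1, r2, r3, r4] (4:Int) [] = r4 from rfl,
      hrow r0 (hr5 _ (by simp)), hrow r1 (hr5 _ (by simp)), hrow r2 (hr5 _ (by simp)),
      hrow r3 (hr5 _ (by simp)), hrow r4 (hr5 _ (by simp))]
  simp

lemma pv_char0 (pair : String) (a b : Char) (r : List Char) (hpl : pair.toList = a :: b :: r) :
    pvChar pair 0 = pvP0 pair ∧ pvP0 pair = String.ofList [a] := by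
  refine ⟨?_, ?_⟩ <;> simp [pvChar, pvP0, hpl, PySem.List.pyGet?_zero]

lemma pv_char1 (pair : String) (a b : Char) (r : List Char) (hpl : pair.toList = a :: b :: r) :
    pvChar pair 1 = pvP1 pair ∧ pvP1 pair = String.ofList [b] := by
  refine ⟨?_, ?_⟩ <;> simp [pvChar, pvP1, hpl, PySem.List.pyGet?, PySem.List.pyIdx?]

theorem pv_main (pair : String) (table : List (List String))
    (hl2 : 2 ≤ pair.toList.length)
    (htg : 5 ≤ table.length)
    (hrg : ∀ j : Nat, j < 5 → 5 ≤ (table.getD j []).length)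
    (hcase : (pvP0 pair = pvP1 pair ∨ pvP0 pair ∉ table.flatMap (fun row => row)
        ∨ pvP1 pair ∉ table.flatMap (fun row => row)) ∨
      (table.length = 5 ∧
       (∀ row ∈ table, row.length = 5) ∧
       (table.flatMap (fun row => row)).count (pvP0 pair) ≤ 1 ∧
       (table.flatMap (fun row => row)).count (pvP1 pair) ≤ 1 ∧
       (∀ row ∈ table, row.getD 4 "" = pvP0 pair → pvP0 pair = pvP1 pair ∨ pvP1 pair ∉ row) ∧
       (∀ row ∈ table, ∀ c : Nat, c < 4 → row.getD c "" = pvP0 pair → pvP1 pair ∈ row →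
          pvP0 pair ≠ pvP1 pair → (row.getD (c+1) "").toList.length = 1))) :
    playfairRuleTwo pair table = playfairRuleTwo_alt pair table := by
  obtain ⟨a, b, r, hpl⟩ : ∃ a b r, pair.toList = a :: b :: r := by
    rcases hq : pair.toList with _ | ⟨a, _ | ⟨b, r⟩⟩
    · rw [hq] at hl2; simp at hl2
    · rw [hq] at hl2; simp at hl2
    · exact ⟨a, b, r, rfl⟩
  obtain ⟨hA0, hP0⟩ := pv_char0 pair a b r hpl
  obtain ⟨hA1, hP1⟩ := pv_char1 pair a b r hpl
  have hflat : table.flatMap (fun row => row) = table.flatten := by simp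
  have hrowmem : ∀ j : Nat, j < 5 → table.getD j [] ∈ table := by
    intro j hj
    rw [List.getD_eq_getElem _ _ (by omega)]
    exact List.getElem_mem (by omega)
  have hpyrowN : ∀ j : Nat, PySem.List.pyGetD table (j:Int) [] = table.getD j [] := by
    intro j; rw [PySem.List.pyGetD_natCast]
  have hpyrow : ∀ i : Int, 0 ≤ i → PySem.List.pyGetD table i [] = table.getD i.toNat [] := by
    intro i h1
    conv_lhs => rw [show i = ((i.toNat : Nat) : Int) by omega]
    rw [PySem.List.pyGetD_natCast]
  have hcellflat : ∀ j : Nat, j < 5 → ∀ cell ∈ table.getD j [], cell ∈ table.flatten := by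
    intro j hj cell hcell; exact List.mem_flatten.2 ⟨_, hrowmem j hj, hcell⟩
  unfold playfairRuleTwo
  by_cases hpp : pvP0 pair = pvP1 pair
  · rw [pvB_guard pair table (Or.inl (by rw [hA0, hA1, hpp]))]
    apply pv_outer_skip
    intro i hi
    have hi' := (PySem.List.mem_pyRange_one (x := i) (a := 0) (b := 5)).1 hi
    apply pv_row_skip pair table i _ (hpyrow i hi'.1) (hrg i.toNat (by omega))
    right
    intro cell hcell
    by_cases hc : cell = pvChar pair 0
    · exact Or.inl hc
    · right; rw [hA1, ← hpp, ← hA0]; exact hc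
  · by_cases h0 : pvP0 pair ∈ table.flatten
    swap
    · rw [pvB_guard pair table (Or.inr (Or.inl (by rw [hA0]; exact fun hm => h0 (pv_comp_subset table htg hrg _ hm))))]
      apply pv_outer_skip
      intro i hi
      have hi' := (PySem.List.mem_pyRange_one (x := i) (a := 0) (b := 5)).1 hi
      apply pv_row_skip pair table i _ (hpyrow i hi'.1) (hrg i.toNat (by omega))
      left
      intro cell hcell hceq
      exact h0 (by rw [← hA0, ← hceq]; exact hcellflat i.toNat (by omega) cell hcell)
    by_cases h1 : pvP1 pair ∈ table.flatten
    swap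
    · rw [pvB_guard pair table (Or.inr (Or.inr (by rw [hA1]; exact fun hm => h1 (pv_comp_subset table htg hrg _ hm))))]
      apply pv_outer_skip
      intro i hi
      have hi' := (PySem.List.mem_pyRange_one (x := i) (a := 0) (b := 5)).1 hi
      apply pv_row_skip pair table i _ (hpyrow i hi'.1) (hrg i.toNat (by omega))
      right
      intro cell hcell
      right
      intro hceq
      exact h1 (by rw [← hA1, ← hceq]; exact hcellflat i.toNat (by omega) cell hcell)
    · -- both letters present: the degenerate disjunct is impossible, extract the strict one
      have hstrict : table.length = 5 ∧
          (∀ row ∈ table, row.length = 5) ∧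
          (table.flatMap (fun row => row)).count (pvP0 pair) ≤ 1 ∧
          (table.flatMap (fun row => row)).count (pvP1 pair) ≤ 1 ∧
          (∀ row ∈ table, row.getD 4 "" = pvP0 pair → pvP0 pair = pvP1 pair ∨ pvP1 pair ∉ row) ∧
          (∀ row ∈ table, ∀ c : Nat, c < 4 → row.getD c "" = pvP0 pair → pvP1 pair ∈ row →
              pvP0 pair ≠ pvP1 pair → (row.getD (c+1) "").toList.length = 1) := by
        rcases hcase with hdeg | hs
        · rcases hdeg with h | h | h
          · exact absurd h hpp
          · rw [hflat] at h; exact absurd h0 h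
          · rw [hflat] at h; exact absurd h1 h
        · exact hs
      obtain ⟨ht5, hr5, hc0, hc1, hwrap, hnb⟩ := hstrict
      rw [hflat] at hc0 hc1
      have hrowlen : ∀ j : Nat, j < 5 → (table.getD j []).length = 5 :=
        fun j hj => hr5 _ (hrowmem j hj)
      obtain ⟨row0, hrow0mem, hp0row⟩ := List.mem_flatten.1 h0
      obtain ⟨k, hkl, hrowk⟩ := List.mem_iff_getElem.1 hrow0mem
      have hk5 : k < 5 := by omega
      replace hp0row : pvP0 pair ∈ table.getD k [] := by
        rw [List.getD_eq_getElem _ _ (by omega), hrowk]; exact hp0row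
      obtain ⟨row1, hrow1mem, hp1row⟩ := List.mem_flatten.1 h1
      obtain ⟨m, hml, hrowm⟩ := List.mem_iff_getElem.1 hrow1mem
      have hm5 : m < 5 := by omega
      replace hp1row : pvP1 pair ∈ table.getD m [] := by
        rw [List.getD_eq_getElem _ _ (by omega), hrowm]; exact hp1row
      have hknot : ∀ j : Nat, j < 5 → j ≠ k → pvP0 pair ∉ table.getD j [] := by
        intro j hj hne
        exact pv_row_unique table _ hc0 k j (by omega) (by omega) hne hp0row
      have hmnot : ∀ j : Nat, j < 5 → j ≠ m → pvP1 pair ∉ table.getD j [] := by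
        intro j hj hne
        exact pv_row_unique table _ hc1 m j (by omega) (by omega) hne hp1row
      have hcr0 : (table.getD k []).count (pvP0 pair) ≤ 1 :=
        le_trans (pv_count_row_le _ _ (hrowmem k hk5) _) hc0
      have hcr1 : (table.getD m []).count (pvP1 pair) ≤ 1 :=
        le_trans (pv_count_row_le _ _ (hrowmem m hm5) _) hc1
      obtain ⟨u, v, hkuv, hu0, hv0⟩ := pv_count_one_decomp _ _ hp0row hcr0
      obtain ⟨w, z, hmwz, hw1, hz1⟩ := pv_count_one_decomp _ _ hp1row hcr1
      have hul : u.length ≤ 4 := by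
        have := hrowlen k hk5; rw [hkuv] at this; simp at this; omega
      have hwl : w.length ≤ 4 := by
        have := hrowlen m hm5; rw [hmwz] at this; simp at this; omega
      have hnotpre : ∀ (x : String) (k0 : Nat), k0 < 5 →
          (∀ j : Nat, j < 5 → j ≠ k0 → x ∉ table.getD j []) →
          x ∉ (table.take k0).flatten := by
        intro x k0 hk0 hx hmem
        obtain ⟨rowt, hrowt, hin⟩ := List.mem_flatten.1 hmem
        obtain ⟨i, hil, hie⟩ := List.mem_take_iff_getElem.1 hrowt
        exact hx i (by omega) (by omega) (by
          rw [List.getD_eq_getElem _ _ (by omega), hie]; exact hin)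
      have hidx0 : PySem.List.index? table.flatten (pvP0 pair)
          = some (5*k + u.length) := by
        rw [PySem.List.index?_eq_some_iff]
        refine ⟨(table.take k).flatten ++ u, v ++ (table.drop (k+1)).flatten, ?_, ?_, ?_⟩
        · rw [pv_split_flatten table k (by omega), hkuv]
          simp [List.append_assoc]
        · rw [List.length_append, pv_flatten_take_len table hr5 k]
          rw [ht5]; omega
        · intro hmem'
          rcases List.mem_append.1 hmem' with h | h
          · exact hnotpre _ k hk5 hknot h
          · exact hu0 h
      have hidx1 : PySem.List.index? table.flatten (pvP1 pair)
          = some (5*m + w.length) := by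
        rw [PySem.List.index?_eq_some_iff]
        refine ⟨(table.take m).flatten ++ w, z ++ (table.drop (m+1)).flatten, ?_, ?_, ?_⟩
        · rw [pv_split_flatten table m (by omega), hmwz]
          simp [List.append_assoc]
        · rw [List.length_append, pv_flatten_take_len table hr5 m]
          rw [ht5]; omega
        · intro hmem'
          rcases List.mem_append.1 hmem' with h | h
          · exact hnotpre _ m hm5 hmnot h
          · exact hw1 h
      -- reduce B
      unfold playfairRuleTwo_alt
      rw [pv_comp_eq_flatten table ht5 hr5]
      rw [if_neg (by
        push_neg
        refine ⟨by rw [hA0, hA1]; exact hpp, by rw [hA0]; exact h0, by rw [hA1]; exact h1⟩)]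
      rw [hA0, hA1, hidx0, hidx1]
      simp only [Option.getD_some]
      rw [pv_divmod k u.length (by omega), pv_divmod m w.length (by omega)]
      by_cases hkm : m = k
      · subst hkm
        rw [if_neg (by simp)]
        have hkrow := hrowlen m hk5
        have hu3 : u.length ≤ 3 := by
          by_contra hcon
          have hu4 : u.length = 4 := by omega
          have hv0' : v = [] := by
            have hlen := hkrow
            rw [hkuv] at hlen
            simp at hlen
            cases v with
            | nil => rfl
            | cons p q => simp at hlen; omega
          have hrow4 : (table.getD m []).getD 4 "" = pvP0 pair := by
            rw [hkuv, hv0', List.getD_append_right _ _ _ _ (by omega)]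
            simp [hu4]
          rcases hwrap _ (hrowmem m hk5) hrow4 with h | h
          · exact hpp h
          · exact h (by rw [hmwz]; simp)
        have hx1 : ((table.getD m []).getD (u.length+1) "").toList.length = 1 := by
          apply hnb _ (hrowmem m hk5) u.length (by omega) _ _ hpp
          · rw [hkuv, List.getD_append_right _ _ _ _ le_rfl]; simp
          · rw [hmwz]; simp
        obtain ⟨xc, hxc⟩ : ∃ xc, ((table.getD m []).getD (u.length+1) "").toList = [xc] := by
          rcases hq : ((table.getD m []).getD (u.length+1) "").toList with _ | ⟨xc, _ | _⟩
          · rw [hq] at hx1; simp at hx1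
          · exact ⟨_, rfl⟩
          · rw [hq] at hx1; simp at hx1
        rw [show PySem.List.pyRange 0 5 1 = PySem.List.pyRange 0 (m:Int) 1 ++ ((m:Int) :: PySem.List.pyRange ((m:Int)+1) 5 1) by
          rw [← PySem.List.pyRange_one_cons (by omega : (m:Int) < 5)]
          exact PySem.List.pyRange_one_append 0 (m:Int) 5 (by omega) (by omega)]
        rw [pv_outer_append_skip _ _ _ _ (by
          intro i hi
          have hi' := (PySem.List.mem_pyRange_one (x := i) (a := 0) (b := (m:Int))).1 hi
          apply pv_row_skip pair table i _ (hpyrow i hi'.1) (hrg i.toNat (by omega))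
          left
          intro cell hcell hceq
          have hmem : pvP0 pair ∈ table.getD i.toNat [] := by
            rw [← hA0, ← hceq]; exact hcell
          exact hknot i.toNat (by omega) (by omega) hmem)]
        conv_lhs => rw [pvA_outer]
        have hinner0 := pv_inner_enum pair table (m:Int) (table.getD m []) (hpyrowN m) (by rw [hrowlen m hk5])
        have hinner : pvA_inner pair table (m:Int)
            = (PySem.List.enumerate (table.getD m []) 0).foldl (pvF (pvChar pair 0) (pvChar pair 1) (m:Int)) ((m:Int), -1, (m:Int), -1) := by
          rw [hinner0, List.take_of_length_le (by rw [hrowlen m hk5])]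
        have hj1 : (pvA_inner pair table (m:Int)).2.1 = (u.length : Int) := by
          rw [hinner, hA0, hA1, hkuv]; exact pv_j1_hit _ _ _ _ _ _ hv0
        have hj2 : (pvA_inner pair table (m:Int)).2.2.2 = (w.length : Int) := by
          rw [hinner, hA0, hA1, hmwz]; exact pv_j2_hit _ _ _ _ _ _ hz1 (Ne.symm hpp)
        have hi1 : (pvA_inner pair table (m:Int)).1 = (m:Int) := by
          rw [hinner]; exact pv_fst _ _ _ _ _ rfl
        have hi2 : (pvA_inner pair table (m:Int)).2.2.1 = (m:Int) := by
          rw [hinner]; exact pv_i2 _ _ _ _ _ rfl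
        rw [if_pos ⟨by rw [hj1]; omega, by rw [hj2]; omega⟩]
        simp only [hi1, hi2, hj1, hj2]
        have hmod : ∀ n : Nat, PySem.Int.mod ((n:Nat) : Int) 5 = ((n % 5 : Nat) : Int) := by
          intro n; simpa using PySem.Int.mod_natCast n 5
        have hx_eq : PySem.List.pyGetD (PySem.List.pyGetD table (m:Int) []) ((u.length:Int) + 1) ""
            = (table.getD m []).getD (u.length+1) "" := by
          rw [hpyrowN m, show ((u.length:Int) + 1) = ((u.length+1 : Nat) : Int) by push_cast; ring,
            PySem.List.pyGetD_natCast]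
        have hBx : PySem.List.pyGetD table.flatten
            (5 * (m:Int) + PySem.Int.mod ((u.length:Int) + 1) 5) ""
            = (table.getD m []).getD (u.length+1) "" := by
          rw [show ((u.length:Int) + 1) = ((u.length+1 : Nat) : Int) by push_cast; ring,
            hmod, show ((u.length+1) % 5 : Nat) = u.length + 1 by omega,
            show (5 * (m:Int) + ((u.length+1 : Nat) : Int)) = ((5*m + (u.length+1) : Nat) : Int) by push_cast; ring,
            PySem.List.pyGetD_natCast]
          exact pv_flat_getD table hr5 m (by omega) (u.length+1) (by omega)
        have hyA : (if ((w.length:Int)) = 4 then PySem.List.pyGetD (PySem.List.pyGetD table (m:Int) []) 0 ""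
            else PySem.List.pyGetD (PySem.List.pyGetD table (m:Int) []) ((w.length:Int) + 1) "")
            = (table.getD m []).getD ((w.length+1) % 5) "" := by
          by_cases hw4 : w.length = 4
          · rw [if_pos (by rw [hw4]; norm_num), hpyrowN m, PySem.List.pyGetD_zero,
              show (w.length+1) % 5 = 0 by omega]
          · rw [if_neg (by intro hq; exact hw4 (by exact_mod_cast hq)), hpyrowN m,
              show ((w.length:Int) + 1) = ((w.length+1 : Nat) : Int) by push_cast; ring,
              PySem.List.pyGetD_natCast, show (w.length+1) % 5 = w.length+1 by omega]
        have hyB : PySem.List.pyGetD table.flatten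
            (5 * (m:Int) + PySem.Int.mod ((w.length:Int) + 1) 5) ""
            = (table.getD m []).getD ((w.length+1) % 5) "" := by
          rw [show ((w.length:Int) + 1) = ((w.length+1 : Nat) : Int) by push_cast; ring,
            hmod, show (5 * (m:Int) + (((w.length+1) % 5 : Nat) : Int)) = ((5*m + (w.length+1) % 5 : Nat) : Int) by push_cast; ring,
            PySem.List.pyGetD_natCast]
          exact pv_flat_getD table hr5 m (by omega) ((w.length+1) % 5) (by omega)
        rw [hyA, hyB, hx_eq, hBx, hpl, hxc]
        rw [PySem.List.slice_to (a::b::r) (by norm_num : (0:Int) ≤ 0),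
            PySem.List.slice_from (a::b::r) (by norm_num : (0:Int) ≤ 1),
            PySem.List.slice_from (a::b::r) (by norm_num : (0:Int) ≤ 2)]
        norm_num
        rw [PySem.List.slice_to (xc::b::r) (by norm_num : (0:Int) ≤ 1),
            PySem.List.slice_from (xc::b::r) (by norm_num : (0:Int) ≤ 2)]
        norm_num
        simp [String.ext_iff]
      · -- different rows: both return pair
        rw [if_pos (by simp; omega)]
        apply pv_outer_skip
        intro i hi
        have hi' := (PySem.List.mem_pyRange_one (x := i) (a := 0) (b := 5)).1 hi
        apply pv_row_skip pair table i _ (hpyrow i hi'.1) (hrg i.toNat (by omega))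
        by_cases hik : i.toNat = m
        · left
          intro cell hcell hceq
          have hmem : pvP0 pair ∈ table.getD m [] := by
            rw [← hA0, ← hceq]; rw [hik] at hcell; exact hcell
          exact hknot m hm5 hkm hmem
        · right
          intro cell hcell
          right
          intro hceq
          have hmem : pvP1 pair ∈ table.getD i.toNat [] := by
            rw [← hA1, ← hceq]; exact hcell
          exact hmnot i.toNat (by omega) hik hmem

-- ===== VERDICT (by name: the statement is the Claim_ definition above) =====
theorem playfairRuleTwo_spec : Claim_equal_playfairRuleTwo := by
  intro pair table _ hpre
  obtain ⟨h1, h2, h3, h4⟩ := hpre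
  unfold Spec_playfairRuleTwo
  exact pv_main pair table h1 h2 h3 h4
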